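-- pv_equiv track=rewrite | github.com/augustin-barillec/sonar | sonar/utils.py | last_long_block
-- ===== SOURCE A (Python) =====
-- def last_long_block(l, value, window_length):
--     current_block_length = 0
--     i = len(l)-1
--     while i >= 0 and current_block_length < window_length:
--         if l[i] == value:
--             current_block_length += 1
--         else:
--             current_block_length = 0
--         i -= 1
--     if current_block_length == window_length:
--         j = i
--         while j >= 0 and l[j] == value:
--             j -= 1
--         return j+1, i+current_block_length
--     else:
--         return None
-- ===== SOURCE B (Python) =====
-- def last_long_block(l, value, window_length):
--     if window_length < 1:
--         return None
--     result = None
--     run_start = 0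
--     run_len = 0
--     for i, x in enumerate(l):
--         if x == value:
--             if run_len == 0:
--                 run_start = i
--             run_len += 1
--             if run_len >= window_length:
--                 result = (run_start, i)
--         else:
--             run_len = 0
--     return result
-- ===== Notes on version B (the rewrite author's own statement) =====
-- stated objective: alternative
-- what changed: Replaces A's backward two-phase scan (find a window of window_length values from the right, then extend leftward to the run start) with a single forward pass that tracks the current run's start and length and overwrites the recorded (start, end) block as runs qualify, returning the last record.
-- intended difference: For window_length = 0 A returns an accidental tuple (start of the trailing run of value, len(l)-1) produced by its sentinel loop exit; B returns None, the intended answer for a degenerate window length. — e.g. on last_long_block([1], 1, 0): A returns some (0, 0), B returns none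
import Mathlib
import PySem

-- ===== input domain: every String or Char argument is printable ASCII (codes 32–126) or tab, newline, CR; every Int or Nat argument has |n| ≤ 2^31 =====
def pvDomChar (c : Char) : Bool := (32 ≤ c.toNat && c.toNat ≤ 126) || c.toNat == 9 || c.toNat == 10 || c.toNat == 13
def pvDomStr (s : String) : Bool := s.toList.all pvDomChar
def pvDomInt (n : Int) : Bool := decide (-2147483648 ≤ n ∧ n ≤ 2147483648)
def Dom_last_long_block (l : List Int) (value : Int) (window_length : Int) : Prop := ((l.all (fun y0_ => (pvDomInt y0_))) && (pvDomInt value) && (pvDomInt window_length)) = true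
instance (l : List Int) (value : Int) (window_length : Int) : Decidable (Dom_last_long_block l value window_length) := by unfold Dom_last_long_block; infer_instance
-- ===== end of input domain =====

-- B replaces A's backward two-phase scan with a single forward run-tracking pass (alternative
-- decomposition, same O(n) cost); for window_length = 0 B returns none where A returns an
-- accidental sentinel tuple (stated as the intended difference D_ below).


-- ===== PORT A =====
-- the backward scan 'while i >= 0 and current_block_length < window_length';
-- l[i] is ported as pyGet? = some value: from the initial call i is always < len(l), so
-- Python's IndexError is unreachable here
def aLoop1 (l : List Int) (value window_length : Int) (i cbl : Int) : Int × Int :=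
  if h : 0 ≤ i ∧ cbl < window_length then
    aLoop1 l value window_length (i - 1)
      (if PySem.List.pyGet? l i = some value then cbl + 1 else 0)
  else (i, cbl)
termination_by (i + 1).toNat
decreasing_by omega

-- the leftward extension 'while j >= 0 and l[j] == value'
def aLoop2 (l : List Int) (value : Int) (j : Int) : Int :=
  if h : 0 ≤ j ∧ PySem.List.pyGet? l j = some value then aLoop2 l value (j - 1) else j
termination_by (j + 1).toNat
decreasing_by omega

def last_long_block (l : List Int) (value : Int) (window_length : Int) : Option (Int × Int) :=
  let p := aLoop1 l value window_length ((l.length : Int) - 1) 0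
  if p.2 = window_length then
    some (aLoop2 l value p.1 + 1, p.1 + p.2)
  else none

-- ===== PORT B =====
-- one forward step of B's loop; state = (result, run_start, run_len)
def bStep (value window_length : Int) (st : Option (Int × Int) × Int × Int) (p : Int × Int) :
    Option (Int × Int) × Int × Int :=
  if p.2 = value then
    let rs := if st.2.2 = 0 then p.1 else st.2.1
    let rl := st.2.2 + 1
    (if window_length ≤ rl then some (rs, p.1) else st.1, rs, rl)
  else (st.1, st.2.1, 0)

def last_long_block_alt (l : List Int) (value : Int) (window_length : Int) : Option (Int × Int) :=
  if window_length < 1 then none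
  else ((PySem.List.enumerate l 0).foldl (bStep value window_length) (none, 0, 0)).1

-- ===== PRECONDITION & SPEC =====
-- For window_length = 0 A returns an accidental tuple (start of the trailing run of value,
-- len(l)-1) produced by its sentinel exit; B returns none, the intended answer for a
-- degenerate window length.
def D_last_long_block (l : List Int) (value : Int) (window_length : Int) : Prop :=
  window_length = 0
instance (l : List Int) (value : Int) (window_length : Int) : Decidable (D_last_long_block l value window_length) := by unfold D_last_long_block; infer_instance

def Spec_last_long_block (l : List Int) (value : Int) (window_length : Int) (out : Option (Int × Int)) : Prop :=
  ¬ D_last_long_block l value window_length → out = last_long_block_alt l value window_length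
instance (l : List Int) (value : Int) (window_length : Int) (out : Option (Int × Int)) : Decidable (Spec_last_long_block l value window_length out) := by unfold Spec_last_long_block; infer_instance

def pvDiffWitness_last_long_block : List Int × Int × Int := ([1], 1, 0)
def pvDiffWitnessOut_last_long_block : (Option (Int × Int)) × (Option (Int × Int)) :=
  (some (0, 0), none)

-- ===== CLAIM (what is proved, stated in full; the proofs are below) =====
def Claim_unchanged_last_long_block : Prop := ∀ (l : List Int) (value : Int) (window_length : Int), Dom_last_long_block l value window_length → Spec_last_long_block l value window_length (last_long_block l value window_length)
def Claim_changed_last_long_block : Prop := Dom_last_long_block (pvDiffWitness_last_long_block.1) (pvDiffWitness_last_long_block.2.1) (pvDiffWitness_last_long_block.2.2) ∧ D_last_long_block (pvDiffWitness_last_long_block.1) (pvDiffWitness_last_long_block.2.1) (pvDiffWitness_last_long_block.2.2) ∧ last_long_block (pvDiffWitness_last_long_block.1) (pvDiffWitness_last_long_block.2.1) (pvDiffWitness_last_long_block.2.2) = pvDiffWitnessOut_last_long_block.1 ∧ last_long_block_alt (pvDiffWitness_last_long_block.1) (pvDiffWitness_last_long_block.2.1) (pvDiffWitness_last_long_block.2.2)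 = pvDiffWitnessOut_last_long_block.2 ∧ pvDiffWitnessOut_last_long_block.1 ≠ pvDiffWitnessOut_last_long_block.2
def Claim_exact_last_long_block : Prop := ∀ (l : List Int) (value : Int) (window_length : Int), Dom_last_long_block l value window_length → D_last_long_block l value window_length → last_long_block l value window_length ≠ last_long_block_alt l value window_length

-- ===== LEMMAS AND PROOFS =====

-- 'winb l v wn e' : a window of wn consecutive values v ends at index e
def winb (l : List Int) (v : Int) (wn : Nat) (e : Nat) : Bool :=
  decide (wn ≤ e + 1 ∧ e < l.length ∧ ∀ k ≤ e, e + 1 - wn ≤ k → l.getD k 0 = v)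

-- start of the maximal run of v's reaching up to (just below) index m
def rsAux (l : List Int) (v : Int) : Nat → Nat
  | 0 => 0
  | m + 1 => if l.getD m 0 = v then rsAux l v m else m + 1

lemma winb_iff (l : List Int) (v : Int) (wn e : Nat) :
    winb l v wn e = true ↔
      wn ≤ e + 1 ∧ e < l.length ∧ ∀ k ≤ e, e + 1 - wn ≤ k → l.getD k 0 = v := by
  simp [winb]

lemma rsAux_eq (l : List Int) (v : Int) (b : Nat) :
    ∀ a, b ≤ a → (∀ k, b ≤ k → k < a → l.getD k 0 = v) →
      (b = 0 ∨ l.getD (b - 1) 0 ≠ v) → rsAux l v a = b := by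
  intro a
  induction a with
  | zero =>
      intro hb _ _
      have hb0 : b = 0 := by omega
      simp [hb0, rsAux]
  | succ a ih =>
      intro hb hall hbd
      by_cases hba : b = a + 1
      · subst hba
        rcases hbd with h0 | hne
        · omega
        · have hne' : ¬ l.getD a 0 = v := by simpa using hne
          simp only [rsAux, if_neg hne']
      · have hba' : b ≤ a := by omega
        have hv : l.getD a 0 = v := hall a hba' (by omega)
        simp only [rsAux, hv, if_pos rfl, ite_true]
        exact ih hba' (fun k hk1 hk2 => hall k hk1 (by omega)) hbd

lemma winb_false_iff (l : List Int) (v : Int) (wn e : Nat) :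
    winb l v wn e = false ↔
      ¬ (wn ≤ e + 1 ∧ e < l.length ∧ ∀ k ≤ e, e + 1 - wn ≤ k → l.getD k 0 = v) := by
  simp [winb]

lemma getD_eq_of_lt (l : List Int) (m : Nat) (hm : m < l.length) : l.getD m 0 = l[m] := by
  rw [List.getD_eq_getElem?_getD, List.getElem?_eq_getElem hm]; rfl

lemma aLoop2_eq (l : List Int) (v : Int) :
    ∀ m : Nat, m ≤ l.length → aLoop2 l v ((m : Int) - 1) = (rsAux l v m : Int) - 1 := by
  intro m
  induction m with
  | zero =>
      intro _
      rw [aLoop2, dif_neg (by simp)]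
      simp [rsAux]
  | succ m ih =>
      intro hm
      have hlt : m < l.length := by omega
      have hcast : ((m + 1 : Nat) : Int) - 1 = (m : Int) := by push_cast; ring
      have hget : PySem.List.pyGet? l (m : Int) = some l[m] := by
        simp [PySem.List.pyGet?_natCast, List.getElem?_eq_getElem hlt]
      have hgd : l.getD m 0 = l[m] := getD_eq_of_lt l m hlt
      rw [hcast, aLoop2]
      by_cases hv : l[m] = v
      · rw [dif_pos ⟨Int.natCast_nonneg m, by rw [hget, hv]⟩]
        have hg : l.getD m 0 = v := by rw [hgd]; exact hv
        simp only [rsAux, if_pos hg]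
        exact ih (by omega)
      · rw [dif_neg (by
          rintro ⟨-, h2⟩
          rw [hget] at h2
          exact hv (by injection h2))]
        have hg : ¬ l.getD m 0 = v := by rw [hgd]; exact hv
        simp only [rsAux, if_neg hg]
        push_cast
        ring

lemma aLoop1_post (l : List Int) (v w : Int) (wn : Nat) (hw : w = (wn : Int)) (h1 : 1 ≤ wn) :
    ∀ (m : Nat) (c : Nat), m + c ≤ l.length → c ≤ wn →
      (∀ k, m ≤ k → k < m + c → l.getD k 0 = v) →
      (∀ e, m + c ≤ e → winb l v wn e = false) →
      (∃ e : Nat, winb l v wn e = true ∧ (∀ e', winb l v wn e' = true → e' ≤ e) ∧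
          wn ≤ e + 1 ∧
          aLoop1 l v w ((m : Int) - 1) (c : Int) = ((e : Int) - wn, (wn : Int))) ∨
      ((∀ e, winb l v wn e = false) ∧
          (aLoop1 l v w ((m : Int) - 1) (c : Int)).2 ≠ w) := by
  intro m
  induction m with
  | zero =>
      intro c hI1 hI2 hall hI3
      rw [aLoop1, dif_neg (by rintro ⟨h0, -⟩; omega)]
      by_cases hc : c = wn
      · subst hc
        left
        refine ⟨c - 1, ?_, ?_, by omega, ?_⟩
        · rw [winb_iff]
          exact ⟨by omega, by omega, fun k hk1 hk2 => hall k (by omega) (by omega)⟩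
        · intro e' he'
          by_contra hgt
          rw [hI3 e' (by omega)] at he'
          exact absurd he' (by simp)
        · simp only [Prod.mk.injEq]
          constructor
          · push_cast [Nat.cast_sub (by omega : 1 ≤ c)]; ring
          · trivial
      · right
        refine ⟨fun e => ?_, by simpa using fun h => hc (by exact_mod_cast hw ▸ h)⟩
        by_cases he : c ≤ e
        · exact hI3 e (by omega)
        · rw [winb_false_iff]
          rintro ⟨h1', -, -⟩
          omega
  | succ m ih =>
      intro c hI1 hI2 hall hI3
      have hcast : ((m + 1 : Nat) : Int) - 1 = (m : Int) := by push_cast; ring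
      have hlt : m < l.length := by omega
      have hget : PySem.List.pyGet? l (m : Int) = some l[m] := by
        simp [PySem.List.pyGet?_natCast, List.getElem?_eq_getElem hlt]
      have hgd : l.getD m 0 = l[m] := getD_eq_of_lt l m hlt
      rw [hcast, aLoop1]
      by_cases hc : c = wn
      · rw [dif_neg (by rintro ⟨-, h2⟩; rw [hw] at h2; exact absurd (by exact_mod_cast h2) (by omega))]
        subst hc
        left
        refine ⟨m + c, ?_, ?_, by omega, ?_⟩
        · rw [winb_iff]
          exact ⟨by omega, by omega, fun k hk1 hk2 => hall k (by omega) (by omega)⟩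
        · intro e' he'
          by_contra hgt
          rw [hI3 e' (by omega)] at he'
          exact absurd he' (by simp)
        · simp only [Prod.mk.injEq]
          constructor
          · push_cast; ring
          · trivial
      · have hclt : c < wn := by omega
        rw [dif_pos ⟨by positivity, by rw [hw]; exact_mod_cast hclt⟩]
        rw [hget]
        by_cases hv : l[m] = v
        · rw [if_pos (by rw [hv])]
          have : ((c : Int) + 1) = ((c + 1 : Nat) : Int) := by push_cast; ring
          rw [this]
          have hres := ih (c + 1) (by omega) (by omega)
            (fun k hk1 hk2 => by
              by_cases hkm : k = m
              · subst hkm; rw [hgd]; exact hv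
              · exact hall k (by omega) (by omega))
            (fun e he => hI3 e (by omega))
          exact hres
        · rw [if_neg (by intro h; exact hv (by injection h))]
          have : (0 : Int) = ((0 : Nat) : Int) := by norm_num
          rw [this]
          refine ih 0 (by omega) (by omega) (by omega) (fun e he => ?_)
          by_cases he2 : m + 1 + c ≤ e
          · exact hI3 e he2
          · rw [winb_false_iff]
            rintro ⟨hw1, hw2, hw3⟩
            exact hv (by rw [← hgd]; exact hw3 m (by omega) (by omega))

lemma A_char (l : List Int) (v w : Int) (wn : Nat) (hw : w = (wn : Int)) (h1 : 1 ≤ wn) :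
    (∃ e : Nat, winb l v wn e = true ∧ (∀ e', winb l v wn e' = true → e' ≤ e) ∧
        last_long_block l v w = some ((rsAux l v (e + 1 - wn) : Int), (e : Int))) ∨
    ((∀ e, winb l v wn e = false) ∧ last_long_block l v w = none) := by
  have h0 : ((0 : Nat) : Int) = (0 : Int) := by norm_num
  have hpost := aLoop1_post l v w wn hw h1 l.length 0 (by omega) (by omega) (by omega)
    (fun e he => by
      rw [winb_false_iff]
      rintro ⟨-, h2, -⟩
      omega)
  rw [h0] at hpost
  rcases hpost with ⟨e, hwin, hmax, hew, hres⟩ | ⟨hnone, hres⟩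
  · left
    refine ⟨e, hwin, hmax, ?_⟩
    have helt : e < l.length := ((winb_iff l v wn e).mp hwin).2.1
    simp only [last_long_block, hres]
    rw [if_pos (by rw [hw])]
    have hm2 : ((e + 1 - wn : Nat) : Int) - 1 = (e : Int) - wn := by
      push_cast [Nat.cast_sub (by omega : wn ≤ e + 1)]; ring
    have h2 := aLoop2_eq l v (e + 1 - wn) (by omega)
    rw [hm2] at h2
    rw [h2]
    simp only [Option.some.injEq, Prod.mk.injEq]
    constructor <;> ring
  · right
    refine ⟨hnone, ?_⟩
    simp only [last_long_block]
    rw [if_neg hres]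

def resultInv (l : List Int) (v : Int) (wn : Nat) (p : Nat) (r : Option (Int × Int)) : Prop :=
  (∃ e : Nat, winb l v wn e = true ∧ e < p ∧
      (∀ e', winb l v wn e' = true → e' < p → e' ≤ e) ∧
      r = some ((rsAux l v (e + 1 - wn) : Int), (e : Int))) ∨
  ((∀ e, e < p → winb l v wn e = false) ∧ r = none)

lemma resultInv_succ (l : List Int) (v : Int) (wn p : Nat) (r : Option (Int × Int))
    (h : winb l v wn p = false) : resultInv l v wn p r → resultInv l v wn (p + 1) r := by
  rintro (⟨e, hwin, hep, hmax, hr⟩ | ⟨hnone, hr⟩)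
  · left
    refine ⟨e, hwin, by omega, fun e' h1' h2' => ?_, hr⟩
    by_cases he' : e' = p
    · subst he'; rw [h] at h1'; exact absurd h1' (by simp)
    · exact hmax e' h1' (by omega)
  · right
    refine ⟨fun e he => ?_, hr⟩
    by_cases he' : e = p
    · subst he'; exact h
    · exact hnone e (by omega)


lemma B_fold (l : List Int) (v w : Int) (wn : Nat) (hw : w = (wn : Int)) (h1 : 1 ≤ wn) :
    ∀ (xs : List Int) (p : Nat) (r : Option (Int × Int)) (rs0 : Int) (t : Nat),
      l.drop p = xs → t ≤ p →
      (∀ k, p - t ≤ k → k < p → l.getD k 0 = v) →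
      (t = p ∨ l.getD (p - t - 1) 0 ≠ v) →
      (0 < t → rs0 = ((p - t : Nat) : Int)) →
      resultInv l v wn p r →
      resultInv l v wn l.length
        (((PySem.List.enumerate xs (p : Int)).foldl (bStep v w) (r, rs0, (t : Int))).1) := by
  intro xs
  induction xs with
  | nil =>
      intro p r rs0 t hdrop ht htr hbd hrs hres
      have hp : l.length ≤ p := by
        have := List.drop_eq_nil_iff.mp hdrop
        omega
      rw [PySem.List.enumerate_nil]
      simp only [List.foldl_nil]
      rcases hres with ⟨e, hwin, hep, hmax, hr⟩ | ⟨hnone, hr⟩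
      · left
        exact ⟨e, hwin, ((winb_iff l v wn e).mp hwin).2.1,
          fun e' h1' h2' => hmax e' h1' (by omega), hr⟩
      · right
        exact ⟨fun e he => hnone e (by omega), hr⟩
  | cons x xs ih =>
      intro p r rs0 t hdrop ht htr hbd hrs hres
      have hp : p < l.length := by
        by_contra hge
        rw [List.drop_eq_nil_iff.mpr (by omega)] at hdrop
        exact List.cons_ne_nil x xs hdrop.symm
      have hx : l[p] = x := by
        have h0 : (l.drop p)[0]? = some x := by rw [hdrop]; simp
        rw [List.getElem?_drop, Nat.add_zero, List.getElem?_eq_getElem hp] at h0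
        injection h0
      have hdrop' : l.drop (p + 1) = xs := by
        have : l.drop (p + 1) = (l.drop p).drop 1 := by
          rw [List.drop_drop]
        rw [this, hdrop]
        rfl
      have hgd : l.getD p 0 = l[p] := getD_eq_of_lt l p hp
      rw [PySem.List.enumerate_cons, List.foldl_cons]
      have hcast1 : ((p : Int) + 1) = ((p + 1 : Nat) : Int) := by push_cast; ring
      by_cases hv : x = v
      · -- l[p] == value
        have hrs' : (if (t : Int) = 0 then (p : Int) else rs0) = ((p - t : Nat) : Int) := by
          by_cases ht0 : t = 0
          · subst ht0; simp
          · rw [if_neg (by exact_mod_cast ht0), hrs (by omega)]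
        have hstep : bStep v w (r, rs0, (t : Int)) ((p : Int), x) =
            ((if w ≤ (t : Int) + 1 then some (((p - t : Nat) : Int), (p : Int)) else r),
              ((p - t : Nat) : Int), (t : Int) + 1) := by
          simp only [bStep, if_pos hv, hrs']
        rw [hstep]
        have hcast2 : ((t : Int) + 1) = ((t + 1 : Nat) : Int) := by push_cast; ring
        rw [hcast1, hcast2]
        have htr' : ∀ k, p + 1 - (t + 1) ≤ k → k < p + 1 → l.getD k 0 = v := by
          intro k hk1 hk2
          by_cases hkp : k = p
          · subst hkp; rw [hgd, hx]; exact hv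
          · exact htr k (by omega) (by omega)
        have hbd' : t + 1 = p + 1 ∨ l.getD (p + 1 - (t + 1) - 1) 0 ≠ v := by
          rcases hbd with h | h
          · left; omega
          · right
            have : p + 1 - (t + 1) - 1 = p - t - 1 := by omega
            rw [this]; exact h
        by_cases hq : wn ≤ t + 1
        · -- a qualifying window ends at p: record (p - t, p)
          rw [if_pos (by rw [hw]; omega)]
          have hrsA : rsAux l v (p + 1 - wn) = p - t := by
            apply rsAux_eq l v (p - t) (p + 1 - wn) (by omega)
              (fun k hk1 hk2 => htr k (by omega) (by omega))
            rcases hbd with h | h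
            · left; omega
            · right; exact h
          have hwinp : winb l v wn p = true := by
            rw [winb_iff]
            exact ⟨by omega, hp, fun k hk1 hk2 => htr' k (by omega) (by omega)⟩
          refine ih (p + 1) _ _ (t + 1) hdrop' (by omega) htr' hbd'
            (fun _ => by congr 1; omega) (Or.inl ⟨p, hwinp, by omega, fun e' _ h2' => by omega,
              by rw [hrsA]⟩)
        · -- run still shorter than the window: no window ends at p
          rw [if_neg (by rw [hw]; omega)]
          refine ih (p + 1) _ _ (t + 1) hdrop' (by omega) htr' hbd'
            (fun _ => by congr 1; omega) ?_
          have hwinp : winb l v wn p = false := by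
            rw [winb_false_iff]
            rintro ⟨hw1, -, hw3⟩
            rcases hbd with h | h
            · omega
            · exact h (hw3 (p - t - 1) (by omega) (by omega))
          exact resultInv_succ l v wn p r hwinp hres
      · -- l[p] != value: run resets
        have hstep : bStep v w (r, rs0, (t : Int)) ((p : Int), x) = (r, rs0, (0 : Int)) := by
          simp only [bStep, if_neg hv]
        rw [hstep]
        have : (0 : Int) = ((0 : Nat) : Int) := by norm_num
        rw [hcast1, this]
        refine ih (p + 1) _ _ 0 hdrop' (by omega) (by omega)
          (Or.inr (by
            have : p + 1 - 0 - 1 = p := by omega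
            rw [this, hgd, hx]
            exact hv)) (by omega) ?_
        have hwinp : winb l v wn p = false := by
          rw [winb_false_iff]
          rintro ⟨hw1, -, hw3⟩
          exact hv (by rw [← hx, ← hgd]; exact hw3 p (by omega) (by omega))
        exact resultInv_succ l v wn p r hwinp hres

lemma B_char (l : List Int) (v w : Int) (wn : Nat) (hw : w = (wn : Int)) (h1 : 1 ≤ wn) :
    resultInv l v wn l.length (last_long_block_alt l v w) := by
  have hnlt : ¬ w < 1 := by omega
  simp only [last_long_block_alt, if_neg hnlt]
  have h0 : (0 : Int) = ((0 : Nat) : Int) := by norm_num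
  rw [h0]
  exact B_fold l v w wn hw h1 l 0 none 0 0 rfl (by omega) (by omega) (Or.inl rfl)
    (by omega) (Or.inr ⟨by omega, rfl⟩)

-- ===== VERDICT (by name: the statement is the Claim_ definition above) =====
theorem last_long_block_spec : Claim_unchanged_last_long_block := by
  intro l v w hdom
  unfold Spec_last_long_block D_last_long_block
  intro hD
  by_cases hlt : w < 1
  · -- w < 0 (w = 0 is excluded by D_): both sides are none
    have hneg : w < 0 := by omega
    simp only [last_long_block, last_long_block_alt, if_pos hlt]
    rw [aLoop1, dif_neg (by rintro ⟨-, h2⟩; omega)]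
    rw [if_neg (by simpa using (by omega : (0 : Int) ≠ w))]
  · have hw1 : 1 ≤ w := by omega
    set wn : Nat := w.toNat with hwn
    have hw : w = (wn : Int) := by omega
    have h1 : 1 ≤ wn := by omega
    have hB := B_char l v w wn hw h1
    rcases A_char l v w wn hw h1 with ⟨e, hwin, hmax, hA⟩ | ⟨hnone, hA⟩
    · rcases hB with ⟨e', hwin', hep', hmax', hB⟩ | ⟨hnoneB, hB⟩
      · have h1e : e ≤ e' := hmax' e hwin ((winb_iff l v wn e).mp hwin).2.1
        have h2e : e' ≤ e := hmax e' hwin'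
        have : e = e' := by omega
        rw [hA, hB, this]
      · have := hnoneB e ((winb_iff l v wn e).mp hwin).2.1
        rw [this] at hwin
        exact absurd hwin (by simp)
    · rcases hB with ⟨e', hwin', hep', hmax', hB⟩ | ⟨hnoneB, hB⟩
      · rw [hnone e'] at hwin'
        exact absurd hwin' (by simp)
      · rw [hA, hB]

theorem last_long_block_changed : Claim_changed_last_long_block := by
  unfold Claim_changed_last_long_block
  refine ⟨by decide, by decide, ?_, by decide, by decide⟩
  show last_long_block [1] 1 0 = some (0, 0)
  simp [last_long_block, aLoop1, aLoop2]

theorem last_long_block_tight : Claim_exact_last_long_block := by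
  intro l v w hdom hD
  unfold D_last_long_block at hD
  subst hD
  simp only [last_long_block, last_long_block_alt]
  rw [aLoop1, dif_neg (by rintro ⟨-, h2⟩; omega)]
  simp
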